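-- pv_equiv track=rewrite | github.com/AnswerBlueStrolls/Tordle | utils/characters.py | compare_names
-- ===== SOURCE A (Python) =====
-- def compare_names(name1: str, name2: str) -> bool:
--     """比较两个名字是否相同"""
--     if not (name1 and name2):
--         return False
--
--     name1 = name1.lower()
--     name2 = name2.lower()
--
--     if name1 == name2:
--         return True
--
--     if "-" in name2:
--         return compare_names(
--             name1.split('-')[0].strip(),
--             name2.split('-')[0].strip()
--         )
--
--     return False
-- ===== SOURCE B (Python) =====
-- def _scan(s: str):
--     """Single pass over s: simultaneously lowercase it, collect the stripped
--     pre-hyphen prefix (leading spaces skipped, `last` marks the end after the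
--     last non-space char), and flag whether a hyphen occurs."""
--     lowered = []
--     pre = []
--     last = 0
--     hyph = False
--     for ch in s:
--         c = ch.lower()
--         lowered.append(c)
--         if not hyph:
--             if c == '-':
--                 hyph = True
--             elif pre or not c.isspace():
--                 pre.append(c)
--                 if not c.isspace():
--                     last = len(pre)
--     return ''.join(lowered), ''.join(pre[:last]), hyph
--
--
-- def compare_names(name1: str, name2: str) -> bool:
--     if not (name1 and name2):
--         return False
--     l1, p1, _ = _scan(name1)
--     l2, p2, h2 = _scan(name2)
--     return l1 == l2 or (h2 and bool(p1) and p1 == p2)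
-- ===== Notes on version B (the rewrite author's own statement) =====
-- stated objective: alternative
-- what changed: A's staged pipeline (lower, ==, split('-')[0], strip, recursive call re-guarding and re-lowercasing the prefixes) is replaced by one accumulator pass per string that simultaneously lowercases each char, collects the whitespace-stripped pre-hyphen prefix and flags the hyphen, followed by a single flat boolean combination.
import Mathlib
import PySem

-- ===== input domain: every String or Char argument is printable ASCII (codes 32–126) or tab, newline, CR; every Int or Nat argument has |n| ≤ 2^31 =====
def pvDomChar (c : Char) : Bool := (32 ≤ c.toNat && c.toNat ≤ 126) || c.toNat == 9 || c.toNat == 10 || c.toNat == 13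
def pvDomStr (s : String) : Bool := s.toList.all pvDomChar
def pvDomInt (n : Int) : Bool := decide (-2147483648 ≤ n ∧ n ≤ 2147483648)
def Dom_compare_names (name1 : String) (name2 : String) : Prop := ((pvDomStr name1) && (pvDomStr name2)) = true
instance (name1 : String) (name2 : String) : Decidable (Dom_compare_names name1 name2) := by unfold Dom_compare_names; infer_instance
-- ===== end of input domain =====

-- B replaces A's staged library calls + recursion by ONE character pass per string that
-- simultaneously lowercases, collects the stripped pre-hyphen prefix and flags the hyphen
-- (objective: alternative); return values only, no side effects.

-- ===== PORT A =====
-- `s.split('-')[0]` (the '[0]' can never fail: split of a nonempty separator is a nonempty list)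
def pvHead (s : String) : String := ((PySem.Str.split? s "-").getD []).headD ""

-- termination helpers, cited by `decreasing_by` below:
theorem pvGoLast (sep : List Char) : ∀ (fuel : Nat) (l cur : List Char) (acc : List (List Char)) (x : List Char),
    (PySem.Chars.splitOn.go sep fuel l cur (acc ++ [x])).headD [] = x := by
  intro fuel
  induction fuel with
  | zero => intro l cur acc x; simp [PySem.Chars.splitOn.go]
  | succ n ih =>
    intro l cur acc x
    cases l with
    | nil => simp [PySem.Chars.splitOn.go]
    | cons c rest =>
      simp only [PySem.Chars.splitOn.go]
      split
      · have : PySem.Chars.splitOn.go sep n (List.drop sep.length (c :: rest)) []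
            (cur.reverse :: (acc ++ [x])) =
            PySem.Chars.splitOn.go sep n (List.drop sep.length (c :: rest)) []
            ((cur.reverse :: acc) ++ [x]) := by simp
        rw [this, ih]
      · exact ih rest (c :: cur) acc x

theorem pvHeadSplit : ∀ (fuel : Nat) (l cur : List Char), l.length < fuel →
    (PySem.Chars.splitOn.go ['-'] fuel l cur []).headD [] =
      cur.reverse ++ l.takeWhile (· ≠ '-') := by
  intro fuel
  induction fuel with
  | zero => intro l cur h; omega
  | succ n ih =>
    intro l cur h
    cases l with
    | nil => simp [PySem.Chars.splitOn.go]
    | cons c rest =>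
      simp only [PySem.Chars.splitOn.go]
      by_cases hc : c = '-'
      · subst hc
        rw [if_pos (by simp [List.isPrefixOf])]
        have he : PySem.Chars.splitOn.go ['-'] n (List.drop ['-'].length ('-' :: rest)) []
            [cur.reverse] =
            PySem.Chars.splitOn.go ['-'] n (List.drop ['-'].length ('-' :: rest)) []
            ([] ++ [cur.reverse]) := by simp
        rw [he, pvGoLast]
        simp [List.takeWhile]
      · rw [if_neg (by simp [List.isPrefixOf]; exact fun h => absurd h.symm hc)]
        rw [ih rest (c :: cur) (by simpa using Nat.lt_of_succ_lt_succ h)]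
        simp [List.takeWhile, hc]

theorem pvHeadChars (s : String) :
    (pvHead s).toList = s.toList.takeWhile (· ≠ '-') := by
  have hs : PySem.Str.split? s "-" =
      some ((PySem.Chars.splitOn s.toList ['-']).map String.ofList) := by
    rw [PySem.Str.split?, PySem.Chars.split?]
    rw [show ("-" : String).toList = ['-'] from rfl]
    simp [List.isEmpty]
  rw [pvHead, hs]
  have := pvHeadSplit (s.toList.length + 1) s.toList [] (Nat.lt_succ_self _)
  simp only [List.reverse_nil, List.nil_append] at this
  rw [show PySem.Chars.splitOn s.toList ['-'] =
      PySem.Chars.splitOn.go ['-'] (s.toList.length + 1) s.toList [] [] from rfl] at *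
  cases hL : PySem.Chars.splitOn.go ['-'] (s.toList.length + 1) s.toList [] [] with
  | nil => rw [hL] at this; simpa using this.symm
  | cons p ps =>
    rw [hL] at this
    simpa [String.toList_ofList] using this

theorem pvStripSublist (cs : List Char) : (PySem.Chars.strip cs).Sublist cs := by
  simp only [PySem.Chars.strip, PySem.Chars.lstrip, PySem.Chars.rstrip]
  have h1 := List.reverse_sublist.mpr
    (List.dropWhile_sublist (p := PySem.Chars.isspace)
      (l := (cs.dropWhile PySem.Chars.isspace).reverse))
  rw [List.reverse_reverse] at h1
  exact h1.trans (List.dropWhile_sublist _)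

theorem pvTakeWhileLt : ∀ (l : List Char), '-' ∈ l →
    (l.takeWhile (fun c => decide (c ≠ '-'))).length < l.length := by
  intro l hm
  induction l with
  | nil => simp at hm
  | cons c rest ih =>
    by_cases hc : c = '-'
    · subst hc; simp [List.takeWhile]
    · have hr : '-' ∈ rest := by
        rcases List.mem_cons.mp hm with h | h
        · exact absurd h.symm hc
        · exact h
      simpa [List.takeWhile, hc] using ih hr

theorem pvPieceShort (s : String) (h : PySem.Str.isIn "-" s = true) :
    (PySem.Str.strip (pvHead s)).toList.length < s.toList.length := by
  have hm : '-' ∈ s.toList := by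
    have := (PySem.Str.isIn_iff_infix "-" s).mp h
    have : ['-'] <:+: s.toList := by simpa using this
    exact this.mem (by simp)
  have h1 : (PySem.Str.strip (pvHead s)).toList.Sublist (pvHead s).toList := by
    simpa [PySem.Str.strip] using pvStripSublist (pvHead s).toList
  have h2 : (pvHead s).toList.length < s.toList.length := by
    rw [pvHeadChars]
    exact pvTakeWhileLt _ hm
  exact Nat.lt_of_le_of_lt h1.length_le h2

def compare_names (name1 : String) (name2 : String) : Bool :=
  if name1.toList = [] ∨ name2.toList = [] then false
  else
    let n1 := PySem.Str.lower name1
    let n2 := PySem.Str.lower name2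
    if n1 = n2 then true
    else if h : PySem.Str.isIn "-" n2 = true then
      compare_names (PySem.Str.strip (pvHead n1)) (PySem.Str.strip (pvHead n2))
    else false
termination_by name2.toList.length
decreasing_by
  calc (PySem.Str.strip (pvHead (PySem.Str.lower name2))).toList.length
      < (PySem.Str.lower name2).toList.length := pvPieceShort _ h
    _ = name2.toList.length := by simp [PySem.Str.toList_lower, PySem.Chars.lower]

-- ===== PORT B =====
-- state of Source B's `_scan` loop: (lowered, pre, last, hyph)
def pvScanStep (st : List Char × List Char × Nat × Bool) (ch : Char) :
    List Char × List Char × Nat × Bool :=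
  let c := PySem.Chars.lowerChar ch
  let lowered := st.1 ++ [c]
  if st.2.2.2 then (lowered, st.2.1, st.2.2.1, true)
  else if c = '-' then (lowered, st.2.1, st.2.2.1, true)
  else if st.2.1 ≠ [] ∨ PySem.Chars.isspace c = false then
    let pre := st.2.1 ++ [c]
    (lowered, pre, if PySem.Chars.isspace c = false then pre.length else st.2.2.1, false)
  else (lowered, st.2.1, st.2.2.1, false)

-- Source B's `_scan`: returns (''.join(lowered), ''.join(pre[:last]), hyph)
def pvScan (s : String) : String × String × Bool :=
  let r := s.toList.foldl pvScanStep ([], [], 0, false)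
  (String.ofList r.1, String.ofList (r.2.1.take r.2.2.1), r.2.2.2)

def compare_names_alt (name1 : String) (name2 : String) : Bool :=
  if name1.toList = [] ∨ name2.toList = [] then false
  else
    let r1 := pvScan name1
    let r2 := pvScan name2
    r1.1 == r2.1 || (r2.2.2 && (r1.2.1 != "") && (r1.2.1 == r2.2.1))

-- ===== PRECONDITION & SPEC =====
def Spec_compare_names (name1 : String) (name2 : String) (out : Bool) : Prop := out = compare_names_alt name1 name2
instance (name1 : String) (name2 : String) (out : Bool) : Decidable (Spec_compare_names name1 name2 out) := by unfold Spec_compare_names; infer_instance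

-- ===== CLAIM (what is proved, stated in full; the proofs are below) =====
def Claim_equal_compare_names : Prop := ∀ (name1 : String) (name2 : String), Dom_compare_names name1 name2 → Spec_compare_names name1 name2 (compare_names name1 name2)

-- ===== LEMMAS AND PROOFS =====

-- lowerChar maps nothing to '-' except '-' itself
theorem pvLowerCharDash (c : Char) : PySem.Chars.lowerChar c = '-' ↔ c = '-' := by
  constructor
  · intro h
    simp only [PySem.Chars.lowerChar, PySem.Chars.isupper] at h
    split_ifs at h with h1
    · exfalso
      simp only [Bool.and_eq_true, decide_eq_true_eq, Char.le_def, UInt32.le_iff_toNat_le] at h1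
      have hA : ('A').val.toNat = 65 := rfl
      have hZ : ('Z').val.toNat = 90 := rfl
      have hv : (c.toNat + 32).isValidChar := by
        have hc : c.toNat = c.val.toNat := rfl
        left; omega
      have e1 : (Char.ofNat (c.toNat + 32)).val.toNat = c.toNat + 32 := by
        rw [show (Char.ofNat (c.toNat + 32)).val.toNat = (Char.ofNat (c.toNat + 32)).toNat from rfl,
           Char.toNat_ofNat, if_pos hv]
      have := congrArg (fun x => x.val.toNat) h
      simp only [e1] at this
      have hd : ('-').val.toNat = 45 := rfl
      have hc : c.toNat = c.val.toNat := rfl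
      omega
    · exact h
  · intro h; subst h; rfl

theorem pvLowerCharIdem (c : Char) :
    PySem.Chars.lowerChar (PySem.Chars.lowerChar c) = PySem.Chars.lowerChar c := by
  simp only [PySem.Chars.lowerChar, PySem.Chars.isupper]
  split_ifs with h1 h2
  · exfalso
    simp only [Bool.and_eq_true, decide_eq_true_eq, Char.le_def, UInt32.le_iff_toNat_le] at h1 h2
    have hA : ('A').val.toNat = 65 := rfl
    have hZ : ('Z').val.toNat = 90 := rfl
    have hc : c.toNat = c.val.toNat := rfl
    have hv : (c.toNat + 32).isValidChar := by left; omega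
    have e1 : (Char.ofNat (c.toNat + 32)).val.toNat = c.toNat + 32 := by
      rw [show (Char.ofNat (c.toNat + 32)).val.toNat = (Char.ofNat (c.toNat + 32)).toNat from rfl,
         Char.toNat_ofNat, if_pos hv]
    omega
  · rfl
  · rfl

-- the lowered accumulator just collects lowerChar of every char
theorem pvScanLow : ∀ (l low pre : List Char) (last : Nat) (hy : Bool),
    (l.foldl pvScanStep (low, pre, last, hy)).1 = low ++ l.map PySem.Chars.lowerChar := by
  intro l
  induction l with
  | nil => intro low pre last hy; simp
  | cons c t ih =>
    intro low pre last hy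
    simp only [List.foldl_cons, List.map_cons]
    have : (pvScanStep (low, pre, last, hy) c).1 = low ++ [PySem.Chars.lowerChar c] ∧
        ∃ pre' last' hy', pvScanStep (low, pre, last, hy) c =
          (low ++ [PySem.Chars.lowerChar c], pre', last', hy') := by
      simp only [pvScanStep]
      split_ifs <;> exact ⟨rfl, _, _, _, rfl⟩
    obtain ⟨_, pre', last', hy', hst⟩ := this
    rw [hst, ih]
    simp

-- once hyph is set, pre/last/hyph are frozen
theorem pvScanFrozen : ∀ (l low pre : List Char) (last : Nat),
    (l.foldl pvScanStep (low, pre, last, true)).2 = (pre, last, true) := by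
  intro l
  induction l with
  | nil => intro low pre last; rfl
  | cons c t ih =>
    intro low pre last
    simp only [List.foldl_cons]
    rw [show pvScanStep (low, pre, last, true) c =
      (low ++ [PySem.Chars.lowerChar c], pre, last, true) from rfl]
    exact ih _ _ _

-- appending a non-space char to pre: rstrip is everything
theorem pvRstripSnocNonspace (pre : List Char) (c : Char) (h : PySem.Chars.isspace c = false) :
    PySem.Chars.rstrip (pre ++ [c]) = pre ++ [c] := by
  simp [PySem.Chars.rstrip, List.dropWhile, h]

-- appending a space char to pre: rstrip unchanged
theorem pvRstripSnocSpace (pre : List Char) (c : Char) (h : PySem.Chars.isspace c = true) :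
    PySem.Chars.rstrip (pre ++ [c]) = PySem.Chars.rstrip pre := by
  simp [PySem.Chars.rstrip, List.dropWhile, h]

-- strip = rstrip after leading-space removal
theorem pvStripEq (cs : List Char) :
    PySem.Chars.strip cs = PySem.Chars.rstrip (cs.dropWhile PySem.Chars.isspace) := by
  rfl

-- main invariant of the scan loop while no hyphen has been seen
theorem pvScanGoPre : ∀ (l low pre : List Char) (last : Nat),
    (∀ c ∈ l, PySem.Chars.lowerChar c ≠ '-') →
    pre.dropWhile PySem.Chars.isspace = pre →
    pre.take last = PySem.Chars.rstrip pre →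
    last ≤ pre.length →
    (l.foldl pvScanStep (low, pre, last, false)).2.1 =
        pre ++ (if pre = [] then (l.map PySem.Chars.lowerChar).dropWhile PySem.Chars.isspace
                else l.map PySem.Chars.lowerChar) ∧
    (l.foldl pvScanStep (low, pre, last, false)).2.1.take
        (l.foldl pvScanStep (low, pre, last, false)).2.2.1 =
      PySem.Chars.rstrip (l.foldl pvScanStep (low, pre, last, false)).2.1 ∧
    (l.foldl pvScanStep (low, pre, last, false)).2.2.1 ≤
      (l.foldl pvScanStep (low, pre, last, false)).2.1.length ∧
    (l.foldl pvScanStep (low, pre, last, false)).2.2.2 = false := by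
  intro l
  induction l with
  | nil =>
    intro low pre last _ h1 h2 h3
    refine ⟨by simp, h2, h3, rfl⟩
  | cons c t ih =>
    intro low pre last hnd h1 h2 h3
    have hcnd : PySem.Chars.lowerChar c ≠ '-' := hnd c (by simp)
    have hndt : ∀ c ∈ t, PySem.Chars.lowerChar c ≠ '-' := fun c hc => hnd c (by simp [hc])
    simp only [List.foldl_cons]
    by_cases hcase : pre ≠ [] ∨ PySem.Chars.isspace (PySem.Chars.lowerChar c) = false
    · have hst : pvScanStep (low, pre, last, false) c =
          (low ++ [PySem.Chars.lowerChar c], pre ++ [PySem.Chars.lowerChar c],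
           if PySem.Chars.isspace (PySem.Chars.lowerChar c) = false
             then (pre ++ [PySem.Chars.lowerChar c]).length else last, false) := by
        simp only [pvScanStep]
        rw [if_neg (by simp), if_neg hcnd, if_pos hcase]
      rw [hst]
      -- invariants for the new state
      have hne : pre ++ [PySem.Chars.lowerChar c] ≠ [] := by simp
      have h1' : (pre ++ [PySem.Chars.lowerChar c]).dropWhile PySem.Chars.isspace =
          pre ++ [PySem.Chars.lowerChar c] := by
        cases hp : pre with
        | nil =>
          rcases hcase with h | h
          · exact absurd hp h
          · simp [List.dropWhile, h]
        | cons p ps =>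
          rw [hp] at h1
          have hps : PySem.Chars.isspace p = false := by
            by_contra hps
            rw [List.dropWhile_cons, if_pos (by simpa using hps)] at h1
            have := congrArg List.length h1
            have hle := List.length_dropWhile_le PySem.Chars.isspace ps
            simp at this; omega
          simp [List.dropWhile, hps]
      by_cases hsp : PySem.Chars.isspace (PySem.Chars.lowerChar c) = false
      · rw [if_pos hsp]
        have h2' : (pre ++ [PySem.Chars.lowerChar c]).take (pre ++ [PySem.Chars.lowerChar c]).length =
            PySem.Chars.rstrip (pre ++ [PySem.Chars.lowerChar c]) := by
          rw [List.take_length, pvRstripSnocNonspace _ _ hsp]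
        obtain ⟨g1, g2, g3, g4⟩ := ih _ _ _ hndt h1' h2' (le_refl _)
        refine ⟨?_, g2, g3, g4⟩
        rw [g1, if_neg hne]
        cases hp : pre with
        | nil =>
          simp only [hp, List.nil_append, List.map_cons, if_pos rfl]
          rw [List.dropWhile_cons, hsp]
          simp
        | cons p ps =>
          rw [if_neg (by simp [hp])]
          simp
      · rw [if_neg hsp]
        have hspT : PySem.Chars.isspace (PySem.Chars.lowerChar c) = true := by
          revert hsp; cases PySem.Chars.isspace (PySem.Chars.lowerChar c) <;> simp
        have h2' : (pre ++ [PySem.Chars.lowerChar c]).take last =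
            PySem.Chars.rstrip (pre ++ [PySem.Chars.lowerChar c]) := by
          rw [List.take_append_of_le_length h3, pvRstripSnocSpace _ _ hspT, h2]
        have h3' : last ≤ (pre ++ [PySem.Chars.lowerChar c]).length := by
          simp; omega
        obtain ⟨g1, g2, g3, g4⟩ := ih _ _ _ hndt h1' h2' h3'
        refine ⟨?_, g2, g3, g4⟩
        rw [g1, if_neg hne]
        have hpne : pre ≠ [] := by
          rcases hcase with h | h
          · exact h
          · rw [h] at hspT; cases hspT
        rw [if_neg hpne]
        simp
    · push_neg at hcase
      obtain ⟨hpe, hsp⟩ := hcase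
      have hspT : PySem.Chars.isspace (PySem.Chars.lowerChar c) = true := by
        revert hsp; cases PySem.Chars.isspace (PySem.Chars.lowerChar c) <;> simp
      have hst : pvScanStep (low, pre, last, false) c =
          (low ++ [PySem.Chars.lowerChar c], pre, last, false) := by
        simp only [pvScanStep]
        rw [if_neg (by simp), if_neg hcnd, if_neg (by push_neg; exact ⟨hpe, by simp [hspT]⟩)]
      rw [hst]
      obtain ⟨g1, g2, g3, g4⟩ := ih _ _ _ hndt h1 h2 h3
      refine ⟨?_, g2, g3, g4⟩
      rw [g1, if_pos hpe, if_pos hpe]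
      simp [List.dropWhile, hspT]

-- stepping the scan on a '-' while hyph is still unset: pre/last kept, hyph set
theorem pvStepDash (st : List Char × List Char × Nat × Bool) (h : st.2.2.2 = false) :
    pvScanStep st '-' = (st.1 ++ ['-'], st.2.1, st.2.2.1, true) := by
  obtain ⟨a, b, c, d⟩ := st
  simp only at h
  subst h
  simp [pvScanStep, (pvLowerCharDash '-').mpr rfl]

-- first-dash decomposition
theorem pvFirstDash : ∀ (l : List Char), '-' ∈ l →
    ∃ l₂, l = l.takeWhile (fun c => decide (c ≠ '-')) ++ '-' :: l₂ := by
  intro l hm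
  induction l with
  | nil => simp at hm
  | cons c t ih =>
    by_cases hc : c = '-'
    · subst hc
      exact ⟨t, by simp [List.takeWhile]⟩
    · have hr : '-' ∈ t := by
        rcases List.mem_cons.mp hm with h | h
        · exact absurd h.symm hc
        · exact h
      obtain ⟨l₂, hl₂⟩ := ih hr
      refine ⟨l₂, ?_⟩
      rw [List.takeWhile_cons, if_pos (by simp [hc])]
      simpa using hl₂

-- characterization of the whole scan
theorem pvScanSpec (s : String) :
    pvScan s = (PySem.Str.lower s,
      String.ofList (PySem.Chars.strip
        ((PySem.Chars.lower s.toList).takeWhile (fun c => decide (c ≠ '-')))),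
      PySem.Chars.isIn ['-'] (PySem.Chars.lower s.toList)) := by
  have hlow : PySem.Chars.lower s.toList = s.toList.map PySem.Chars.lowerChar := rfl
  have hmem : ('-' ∈ PySem.Chars.lower s.toList) ↔ ('-' ∈ s.toList) := by
    rw [hlow]
    constructor
    · intro h
      obtain ⟨d, hd, he⟩ := List.mem_map.mp h
      rwa [(pvLowerCharDash d).mp he] at hd
    · intro h
      exact List.mem_map.mpr ⟨'-', h, (pvLowerCharDash '-').mpr rfl⟩
  have hIn : PySem.Chars.isIn ['-'] (PySem.Chars.lower s.toList) =
      decide ('-' ∈ s.toList) := by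
    by_cases h : '-' ∈ s.toList
    · rw [decide_eq_true h]
      apply (PySem.Chars.isIn_iff_infix _ _).mpr
      obtain ⟨l₁, l₂, he⟩ := List.mem_iff_append.mp (hmem.mpr h)
      exact ⟨l₁, l₂, by simpa using he.symm⟩
    · rw [decide_eq_false h]
      apply PySem.Chars.isIn_eq_false_iff _ _ |>.mpr
      intro hin
      exact h (hmem.mp (hin.mem (by simp)))
  have hStrLow : PySem.Str.lower s = String.ofList (s.toList.map PySem.Chars.lowerChar) := by
    apply String.toList_injective
    rw [PySem.Str.toList_lower, String.toList_ofList, hlow]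
  -- predicate transport through lowerChar
  have hpred : (fun c => decide (PySem.Chars.lowerChar c ≠ '-')) =
      (fun c : Char => decide (c ≠ '-')) := by
    funext c
    by_cases hc : c = '-'
    · subst hc; simp [(pvLowerCharDash '-').mpr rfl]
    · have h1 : PySem.Chars.lowerChar c ≠ '-' := fun h => hc ((pvLowerCharDash c).mp h)
      simp [hc, h1]
  have htw : (s.toList.map PySem.Chars.lowerChar).takeWhile (fun c => decide (c ≠ '-')) =
      (s.toList.takeWhile (fun c => decide (c ≠ '-'))).map PySem.Chars.lowerChar := by
    rw [List.takeWhile_map]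
    have hco : ((fun c => decide (c ≠ '-')) ∘ PySem.Chars.lowerChar) =
        (fun c : Char => decide (c ≠ '-')) := by
      funext c
      by_cases hc : c = '-'
      · subst hc; simp [Function.comp, (pvLowerCharDash '-').mpr rfl]
      · have h1 : PySem.Chars.lowerChar c ≠ '-' := fun h => hc ((pvLowerCharDash c).mp h)
        simp [Function.comp, hc, h1]
    rw [hco]
  by_cases h : '-' ∈ s.toList
  · -- split at the first dash
    obtain ⟨l₂, hdec⟩ := pvFirstDash s.toList h
    set l₁ := s.toList.takeWhile (fun c => decide (c ≠ '-')) with hl₁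
    have hnd1 : ∀ c ∈ l₁, PySem.Chars.lowerChar c ≠ '-' := by
      intro c hc he
      have h1 := List.mem_takeWhile_imp hc
      have h2 : c ≠ '-' := by simpa using h1
      exact h2 ((pvLowerCharDash c).mp he)
    have hGP := pvScanGoPre l₁ [] [] 0 hnd1 (by simp) (by simp [PySem.Chars.rstrip]) (by simp)
    obtain ⟨g1, g2, _, g4⟩ := hGP
    simp only [List.nil_append, if_pos rfl, if_true] at g1
    set r₁ := l₁.foldl pvScanStep (([] : List Char), ([] : List Char), 0, false) with hr₁
    -- process the dash
    have hdl : PySem.Chars.lowerChar '-' = '-' := (pvLowerCharDash '-').mpr rfl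
    have hstep : pvScanStep r₁ '-' = (r₁.1 ++ ['-'], r₁.2.1, r₁.2.2.1, true) :=
      pvStepDash r₁ g4
    have hfold : s.toList.foldl pvScanStep ([], [], 0, false) =
        l₂.foldl pvScanStep (pvScanStep r₁ '-') := by
      conv_lhs => rw [hdec]
      rw [List.foldl_append, List.foldl_cons, ← hr₁]
    have hfin2 : (s.toList.foldl pvScanStep ([], [], 0, false)).2 =
        (r₁.2.1, r₁.2.2.1, true) := by
      rw [hfold, hstep]
      exact pvScanFrozen l₂ _ _ _
    simp only [pvScan]
    rw [hIn, decide_eq_true h]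
    refine Prod.ext ?_ (Prod.ext ?_ ?_)
    · show String.ofList (s.toList.foldl pvScanStep ([], [], 0, false)).1 = PySem.Str.lower s
      rw [pvScanLow, hStrLow]; simp
    · show String.ofList ((s.toList.foldl pvScanStep ([], [], 0, false)).2.1.take
          (s.toList.foldl pvScanStep ([], [], 0, false)).2.2.1) = _
      rw [hfin2]
      simp only
      rw [g2, g1, hlow, htw, hl₁, ← pvStripEq]
    · show (s.toList.foldl pvScanStep ([], [], 0, false)).2.2.2 = true
      rw [hfin2]
  · -- no dash anywhere
    have hnd : ∀ c ∈ s.toList, PySem.Chars.lowerChar c ≠ '-' := by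
      intro c hc he
      exact h (by rwa [(pvLowerCharDash c).mp he] at hc)
    have hGP := pvScanGoPre s.toList [] [] 0 hnd (by simp) (by simp [PySem.Chars.rstrip]) (by simp)
    obtain ⟨g1, g2, _, g4⟩ := hGP
    simp only [List.nil_append, if_pos rfl, if_true] at g1
    have htws : (s.toList.map PySem.Chars.lowerChar).takeWhile (fun c => decide (c ≠ '-')) =
        s.toList.map PySem.Chars.lowerChar := by
      apply List.takeWhile_eq_self_iff.mpr
      intro c hc
      obtain ⟨d, hd, rfl⟩ := List.mem_map.mp hc
      have h1 : PySem.Chars.lowerChar d ≠ '-' :=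
        fun he => h (by rwa [(pvLowerCharDash d).mp he] at hd)
      simp [h1]
    simp only [pvScan]
    rw [hIn, decide_eq_false h]
    refine Prod.ext ?_ (Prod.ext ?_ ?_)
    · show String.ofList (s.toList.foldl pvScanStep ([], [], 0, false)).1 = PySem.Str.lower s
      rw [pvScanLow, hStrLow]; simp
    · show String.ofList ((s.toList.foldl pvScanStep ([], [], 0, false)).2.1.take
          (s.toList.foldl pvScanStep ([], [], 0, false)).2.2.1) = _
      rw [g2, g1, hlow, htws, ← pvStripEq]
    · show (s.toList.foldl pvScanStep ([], [], 0, false)).2.2.2 = false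
      exact g4

-- every character of the stripped first piece comes from the original string
theorem pvPieceMem (s : String) {c : Char} (hc : c ∈ (PySem.Str.strip (pvHead s)).toList) :
    c ∈ s.toList ∧ c ≠ '-' := by
  have h1 : (PySem.Str.strip (pvHead s)).toList.Sublist (pvHead s).toList := by
    simpa [PySem.Str.strip] using pvStripSublist (pvHead s).toList
  have h2 : c ∈ (pvHead s).toList := h1.mem hc
  rw [pvHeadChars] at h2
  exact ⟨(List.takeWhile_sublist _).mem h2,
    by simpa using List.mem_takeWhile_imp h2⟩

-- the prefixes extracted from an already-lowercased string are fixed by `lower`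
theorem pvLowerFix (t : String) (hfix : ∀ c ∈ t.toList, PySem.Chars.lowerChar c = c) :
    PySem.Str.lower t = t := by
  apply String.toList_injective
  rw [PySem.Str.toList_lower]
  simp only [PySem.Chars.lower]
  exact List.map_congr_left hfix |>.trans (List.map_id _)

-- A's stripped first piece, expressed through pvScan's characterization
theorem pvPieceEq (s : String) :
    PySem.Str.strip (pvHead (PySem.Str.lower s)) =
      String.ofList (PySem.Chars.strip
        ((PySem.Chars.lower s.toList).takeWhile (fun c => decide (c ≠ '-')))) := by
  apply String.toList_injective
  rw [PySem.Str.toList_strip, pvHeadChars, PySem.Str.toList_lower, String.toList_ofList]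

-- ===== VERDICT (by name: the statement is the Claim_ definition above) =====
theorem compare_names_spec : Claim_equal_compare_names := by
  intro name1 name2 _
  unfold Spec_compare_names
  rw [compare_names, compare_names_alt]
  by_cases hg : name1.toList = [] ∨ name2.toList = []
  · rw [if_pos hg, if_pos hg]
  rw [if_neg hg, if_neg hg]
  simp only [pvScanSpec]
  set a := String.ofList (PySem.Chars.strip
      ((PySem.Chars.lower name1.toList).takeWhile (fun c => decide (c ≠ '-')))) with ha
  set b := String.ofList (PySem.Chars.strip
      ((PySem.Chars.lower name2.toList).takeWhile (fun c => decide (c ≠ '-')))) with hb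
  have hpa : PySem.Str.strip (pvHead (PySem.Str.lower name1)) = a := pvPieceEq name1
  have hpb : PySem.Str.strip (pvHead (PySem.Str.lower name2)) = b := pvPieceEq name2
  have hbridge : PySem.Chars.isIn ['-'] (PySem.Chars.lower name2.toList) =
      PySem.Str.isIn "-" (PySem.Str.lower name2) := by
    rw [PySem.Str.isIn_eq, show ("-" : String).toList = ['-'] from rfl, PySem.Str.toList_lower]
  by_cases he : PySem.Str.lower name1 = PySem.Str.lower name2
  · rw [if_pos he]
    simp [he]
  rw [if_neg he]
  have hbeq : (PySem.Str.lower name1 == PySem.Str.lower name2) = false := by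
    simpa using he
  by_cases hh : PySem.Str.isIn "-" (PySem.Str.lower name2) = true
  · rw [dif_pos hh, hpa, hpb]
    rw [hbridge, hh, hbeq]
    simp only [Bool.false_or, Bool.true_and]
    -- both sides of the remaining goal are about the pieces a, b
    have hafix : PySem.Str.lower a = a := by
      apply pvLowerFix
      intro c hc
      have := (pvPieceMem (PySem.Str.lower name1) (by rwa [hpa] )).1
      · rw [PySem.Str.toList_lower, PySem.Chars.lower] at this
        obtain ⟨d, _, rfl⟩ := List.mem_map.mp this
        exact pvLowerCharIdem d
    have hbfix : PySem.Str.lower b = b := by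
      apply pvLowerFix
      intro c hc
      have := (pvPieceMem (PySem.Str.lower name2) (by rwa [hpb] )).1
      · rw [PySem.Str.toList_lower, PySem.Chars.lower] at this
        obtain ⟨d, _, rfl⟩ := List.mem_map.mp this
        exact pvLowerCharIdem d
    have hbdash : PySem.Str.isIn "-" b = false := by
      rw [← Bool.not_eq_true, PySem.Str.isIn_iff_infix]
      intro hin
      have hmem : '-' ∈ b.toList := hin.mem (by simp)
      exact (pvPieceMem (PySem.Str.lower name2) (by rwa [hpb])).2 rfl
    rw [compare_names]
    by_cases hg' : a.toList = [] ∨ b.toList = []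
    · rw [if_pos hg']
      rcases hg' with h | h
      · have : a = "" := by
          apply String.toList_injective; simpa using h
        simp [this]
      · have hb0 : b = "" := by
          apply String.toList_injective; simpa using h
        by_cases h0 : a = ""
        · simp [h0]
        · have : (a == b) = false := by
            simp [hb0]; intro hab; exact h0 hab
          simp [this]
    · rcases not_or.mp hg' with ⟨hg1, hg2⟩
      rw [if_neg hg', hafix, hbfix]
      have hane : (a != "") = true := by
        simp; intro h0; exact hg1 (by simp [h0])
      by_cases hab : a = b
      · rw [if_pos hab]
        have hbne : ¬ b = "" := fun h0 => hg2 (by simp [h0])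
        simp [hab, hbne]
      · rw [if_neg hab, dif_neg (by rw [hbdash]; simp)]
        simp [hane, hab]
  · rw [dif_neg hh, hbridge, hbeq]
    have : PySem.Str.isIn "-" (PySem.Str.lower name2) = false := by
      revert hh; cases PySem.Str.isIn "-" (PySem.Str.lower name2) <;> simp
    rw [this]
    simp
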